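-- pv_equiv track=rewrite | github.com/TanyaBazeleva/Bazelieva | 5.4_3967.py | find
-- ===== SOURCE A (Python) =====
-- def cut(x, k, l):
--     count = 0
--     for i in x:
--         count += i // l
--     return count >= k
--
-- def find(n, k, x):
--     l, r = 1, max(x)
--     while l < r:
--         m = (l + r + 1) // 2
--         if cut(x, k, m):
--             l = m
--         else:
--             r = m - 1
--     return l
-- ===== SOURCE B (Python) =====
-- def find(n, k, x):
--     def go(lo, size):
--         # searches the range [lo, lo + size]
--         if size == 0:
--             return lo
--         h = (size + 1) // 2
--         m = lo + h
--         if sum(i // m for i in x) >= k: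
--             return go(m, size - h)
--         return go(lo, h - 1)
--     return go(1, max(max(x) - 1, 0))
-- ===== Notes on version B (the rewrite author's own statement) =====
-- stated objective: alternative
-- what changed: Recasts A's two-endpoint (l, r) while-loop binary search with its separate 'cut' accumulator-loop helper as a self-recursive search over an (offset, size) range with the feasibility count inlined as a generator-expression sum; same halving strategy and cost, different decomposition and state.
import Mathlib
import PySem

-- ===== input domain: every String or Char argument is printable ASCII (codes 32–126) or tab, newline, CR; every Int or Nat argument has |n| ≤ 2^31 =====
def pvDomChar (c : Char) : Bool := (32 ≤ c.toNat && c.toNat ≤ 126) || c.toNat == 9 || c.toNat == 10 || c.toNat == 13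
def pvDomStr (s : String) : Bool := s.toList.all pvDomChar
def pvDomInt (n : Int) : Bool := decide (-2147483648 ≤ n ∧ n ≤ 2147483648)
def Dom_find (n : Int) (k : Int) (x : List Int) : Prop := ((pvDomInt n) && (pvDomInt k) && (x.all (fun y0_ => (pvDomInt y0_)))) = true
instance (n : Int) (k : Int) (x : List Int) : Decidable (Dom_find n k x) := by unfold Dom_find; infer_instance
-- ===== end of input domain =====

-- B recasts A's two-endpoint while loop with its `cut` accumulator helper as a self-recursive
-- search over an (offset, size) range with the feasibility sum inlined; a different decomposition
-- of the same cost, not claimed faster.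

-- ===== PORT A =====
def cutA (x : List Int) (k : Int) (l : Int) : Bool :=
  decide (x.foldl (fun count i => count + PySem.Int.floordiv i l) 0 ≥ k)

def findLoop (x : List Int) (k : Int) (l r : Int) : Int :=
  if _h : l < r then
    let m := PySem.Int.floordiv (l + r + 1) 2
    if cutA x k m then findLoop x k m r else findLoop x k l (m - 1)
  else l
termination_by (r - l).toNat
decreasing_by
  · have hb := PySem.Int.floordiv_two_mid_bounds (lo := l + 1) (hi := r) (by omega)
    rw [show l + 1 + r = l + r + 1 from by ring] at hb
    omega
  · have hb := PySem.Int.floordiv_two_mid_bounds (lo := l + 1) (hi := r) (by omega)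
    rw [show l + 1 + r = l + r + 1 from by ring] at hb
    omega

def find (n : Int) (k : Int) (x : List Int) : Int :=
  match PySem.List.max? x (fun y => y) with
  | none => 0   -- max([]) raises ValueError in Python; excluded by Pre_find
  | some r => findLoop x k 1 r

-- ===== PORT B =====
-- B's range is tracked as a start plus a size; the size is a count, never negative (Python's
-- max(max(x) - 1, 0) start is the Int.toNat below), so it is a Nat here.
def goB (x : List Int) (k : Int) (lo : Int) (size : Nat) : Int :=
  if _h : size = 0 then lo
  else
    let h := (size + 1) / 2
    let m := lo + (h : Int)
    if (x.map (fun i => PySem.Int.floordiv i m)).sum ≥ k then goB x k m (size - h)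
    else goB x k lo (h - 1)
termination_by size
decreasing_by
  · exact Nat.sub_lt (Nat.pos_of_ne_zero _h)
      (Nat.div_pos (Nat.succ_le_succ (Nat.pos_of_ne_zero _h)) (by decide))
  · exact lt_of_lt_of_le
      (Nat.sub_lt (Nat.div_pos (Nat.succ_le_succ (Nat.pos_of_ne_zero _h)) (by decide))
        (by decide))
      (Nat.lt_succ_iff.mp (Nat.div_lt_self (Nat.succ_pos _) (by decide)))

def find_alt (n : Int) (k : Int) (x : List Int) : Int :=
  match PySem.List.max? x (fun y => y) with
  | none => 0   -- max([]) raises ValueError in Python; excluded by Pre_find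
  | some m => goB x k 1 (m - 1).toNat

-- ===== PRECONDITION & SPEC =====
-- Pre_ excludes only the empty list, on which A raises ValueError (max() of an empty sequence).
def Pre_find (n : Int) (k : Int) (x : List Int) : Prop := x ≠ []
instance (n : Int) (k : Int) (x : List Int) : Decidable (Pre_find n k x) := by unfold Pre_find; infer_instance

def pvWitness_find : Int × Int × List Int := (4, 2, [5, 3, 0, 9])

def Spec_find (n : Int) (k : Int) (x : List Int) (out : Int) : Prop := out = find_alt n k x
instance (n : Int) (k : Int) (x : List Int) (out : Int) : Decidable (Spec_find n k x out) := by unfold Spec_find; infer_instance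

-- ===== CLAIM (what is proved, stated in full; the proofs are below) =====
def Claim_equal_find : Prop := ∀ (n : Int) (k : Int) (x : List Int), Dom_find n k x → Pre_find n k x → Spec_find n k x (find n k x)

-- ===== LEMMAS AND PROOFS =====

-- A's cut helper is the same feasibility test as B's inlined sum
lemma cutA_iff (x : List Int) (k l : Int) :
    cutA x k l = true ↔ (x.map (fun i => PySem.Int.floordiv i l)).sum ≥ k := by
  have h := PySem.List.foldl_add x (fun i => PySem.Int.floordiv i l) 0
  simp only [zero_add] at h
  simp [cutA, h]

-- A's (l, r) loop and B's (lo, size) recursion walk the same probe sequence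
lemma loop_eq (x : List Int) (k : Int) :
    ∀ d : Nat, ∀ l r : Int, (r - l).toNat ≤ d → findLoop x k l r = goB x k l (r - l).toNat := by
  intro d
  induction d with
  | zero =>
    intro l r hd
    have hnlt : ¬ l < r := by omega
    rw [findLoop, dif_neg hnlt, show (r - l).toNat = 0 from by omega, goB]
    simp
  | succ d ih =>
    intro l r hd
    by_cases hlt : l < r
    · have hs : (r - l).toNat ≠ 0 := by omega
      have hmeq : PySem.Int.floordiv (l + r + 1) 2 = l + ((((r - l).toNat + 1) / 2 : Nat) : Int) := by
        rw [PySem.Int.floordiv_eq_ediv_of_pos (by norm_num)]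
        omega
      rw [findLoop, dif_pos hlt, goB, dif_neg hs]
      dsimp only
      rw [hmeq]
      by_cases hc : (x.map (fun i =>
          PySem.Int.floordiv i (l + ((((r - l).toNat + 1) / 2 : Nat) : Int)))).sum ≥ k
      · rw [if_pos ((cutA_iff x k _).mpr hc), if_pos hc,
          ih _ _ (by omega : (r - (l + ((((r - l).toNat + 1) / 2 : Nat) : Int))).toNat ≤ d),
          show (r - (l + ((((r - l).toNat + 1) / 2 : Nat) : Int))).toNat
            = (r - l).toNat - ((r - l).toNat + 1) / 2 from by omega]
      · rw [if_neg (fun hb => hc ((cutA_iff x k _).mp hb)), if_neg hc,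
          ih _ _ (by omega : ((l + ((((r - l).toNat + 1) / 2 : Nat) : Int)) - 1 - l).toNat ≤ d),
          show ((l + ((((r - l).toNat + 1) / 2 : Nat) : Int)) - 1 - l).toNat
            = ((r - l).toNat + 1) / 2 - 1 from by omega]
    · have hnlt : ¬ l < r := hlt
      rw [findLoop, dif_neg hnlt, show (r - l).toNat = 0 from by omega, goB]
      simp

-- ===== VERDICT (by name: the statement is the Claim_ definition above) =====
theorem find_spec : Claim_equal_find := by
  intro n k x _hdom hpre
  unfold Spec_find
  cases hM : PySem.List.max? x (fun y => y) with
  | none => exact absurd ((PySem.List.max?_eq_none_iff x (fun y => y)).mp hM) hpre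
  | some M =>
    simp only [find, find_alt, hM]
    exact loop_eq x k (M - 1).toNat 1 M le_rfl
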